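-- pv_equiv track=rewrite | github.com/dshoghanian/MLS-NLP | scripts/topic_modeling.py | assign_label
-- ===== SOURCE A (Python) =====
-- TOPIC_LABELS = {
--     frozenset(["transfer","signing","contract","deal","loan","fee","market",
--                "window","rumors","move"]): "Transfers & Signings",
--     frozenset(["goal","score","win","loss","draw","points","result","final",
--                "penalty","extra","time"]): "Match Results",
--     frozenset(["injury","injured","return","surgery","fitness","health",
--                "week","knee","hamstring","medical"]): "Injuries & Fitness",
--     frozenset(["coach","manager","head","fired","appointed","staff","staff",
--                "tactical","formation","lineup"]): "Coaching & Tactics",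
--     frozenset(["playoff","cup","final","championship","mls","conference",
--                "supporter","shield","knockout"]): "Playoffs & Championships",
--     frozenset(["fan","support","fans","ticket","stadium","home","away",
--                "crowd","atmosphere","sold","out"]): "Fan Culture & Attendance",
--     frozenset(["value","salary","wage","budget","spend","ownership","invest",
--                "franchise","revenue","worth"]): "Finance & Ownership",
-- }
--
-- def assign_label(top_words: list[str]) -> str:
--     word_set = set(top_words)
--     best_label, best_score = "General MLS News", 0
--     for keyword_set, label in TOPIC_LABELS.items():
--         score = len(keyword_set & word_set)
--         if score > best_score:
--             best_score, best_label = score, label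
--     return best_label
-- ===== SOURCE B (Python) =====
-- # Hand-written inverted index: keyword -> labels of the topic sets containing it.
-- KEYWORD_LABELS = {
--     'contract': ['Transfers & Signings'],
--     'deal': ['Transfers & Signings'],
--     'fee': ['Transfers & Signings'],
--     'loan': ['Transfers & Signings'],
--     'market': ['Transfers & Signings'],
--     'move': ['Transfers & Signings'],
--     'rumors': ['Transfers & Signings'],
--     'signing': ['Transfers & Signings'],
--     'transfer': ['Transfers & Signings'],
--     'window': ['Transfers & Signings'],
--     'draw': ['Match Results'],
--     'extra': ['Match Results'],
--     'final': ['Match Results', 'Playoffs & Championships'],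
--     'goal': ['Match Results'],
--     'loss': ['Match Results'],
--     'penalty': ['Match Results'],
--     'points': ['Match Results'],
--     'result': ['Match Results'],
--     'score': ['Match Results'],
--     'time': ['Match Results'],
--     'win': ['Match Results'],
--     'fitness': ['Injuries & Fitness'],
--     'hamstring': ['Injuries & Fitness'],
--     'health': ['Injuries & Fitness'],
--     'injured': ['Injuries & Fitness'],
--     'injury': ['Injuries & Fitness'],
--     'knee': ['Injuries & Fitness'],
--     'medical': ['Injuries & Fitness'],
--     'return': ['Injuries & Fitness'],
--     'surgery': ['Injuries & Fitness'],
--     'week': ['Injuries & Fitness'],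
--     'appointed': ['Coaching & Tactics'],
--     'coach': ['Coaching & Tactics'],
--     'fired': ['Coaching & Tactics'],
--     'formation': ['Coaching & Tactics'],
--     'head': ['Coaching & Tactics'],
--     'lineup': ['Coaching & Tactics'],
--     'manager': ['Coaching & Tactics'],
--     'staff': ['Coaching & Tactics'],
--     'tactical': ['Coaching & Tactics'],
--     'championship': ['Playoffs & Championships'],
--     'conference': ['Playoffs & Championships'],
--     'cup': ['Playoffs & Championships'],
--     'knockout': ['Playoffs & Championships'],
--     'mls': ['Playoffs & Championships'],
--     'playoff': ['Playoffs & Championships'],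
--     'shield': ['Playoffs & Championships'],
--     'supporter': ['Playoffs & Championships'],
--     'atmosphere': ['Fan Culture & Attendance'],
--     'away': ['Fan Culture & Attendance'],
--     'crowd': ['Fan Culture & Attendance'],
--     'fan': ['Fan Culture & Attendance'],
--     'fans': ['Fan Culture & Attendance'],
--     'home': ['Fan Culture & Attendance'],
--     'out': ['Fan Culture & Attendance'],
--     'sold': ['Fan Culture & Attendance'],
--     'stadium': ['Fan Culture & Attendance'],
--     'support': ['Fan Culture & Attendance'],
--     'ticket': ['Fan Culture & Attendance'],
--     'budget': ['Finance & Ownership'],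
--     'franchise': ['Finance & Ownership'],
--     'invest': ['Finance & Ownership'],
--     'ownership': ['Finance & Ownership'],
--     'revenue': ['Finance & Ownership'],
--     'salary': ['Finance & Ownership'],
--     'spend': ['Finance & Ownership'],
--     'value': ['Finance & Ownership'],
--     'wage': ['Finance & Ownership'],
--     'worth': ['Finance & Ownership'],
-- }
--
-- LABELS = ['Transfers & Signings', 'Match Results', 'Injuries & Fitness', 'Coaching & Tactics', 'Playoffs & Championships', 'Fan Culture & Attendance', 'Finance & Ownership']
--
--
-- def assign_label(top_words: list[str]) -> str:
--     scores = {}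
--     for w in set(top_words):
--         for label in KEYWORD_LABELS.get(w, []):
--             scores[label] = scores.get(label, 0) + 1
--     best = max(LABELS, key=lambda l: scores.get(l, 0))
--     return best if scores.get(best, 0) > 0 else "General MLS News"
-- ===== Notes on version B (the rewrite author's own statement) =====
-- stated objective: alternative
-- what changed: Replaces the per-topic set-intersection scan with a hand-written inverted index (keyword -> labels) scored in one pass over the deduplicated words, then selecting via max(LABELS, key=score) with a zero-score fallback instead of a running strict-max loop.
import Mathlib
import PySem

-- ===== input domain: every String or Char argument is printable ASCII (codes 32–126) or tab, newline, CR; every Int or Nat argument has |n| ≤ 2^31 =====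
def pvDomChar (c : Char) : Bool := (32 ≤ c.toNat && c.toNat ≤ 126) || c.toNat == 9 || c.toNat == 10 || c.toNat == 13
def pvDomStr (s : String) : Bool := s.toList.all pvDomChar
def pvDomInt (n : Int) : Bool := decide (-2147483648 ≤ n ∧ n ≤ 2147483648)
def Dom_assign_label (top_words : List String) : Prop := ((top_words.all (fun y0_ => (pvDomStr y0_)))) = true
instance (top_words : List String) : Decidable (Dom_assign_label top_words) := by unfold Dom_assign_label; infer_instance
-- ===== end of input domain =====

set_option maxRecDepth 100000

-- B replaces A's per-topic set-intersection loop by a hand-written inverted index (keyword -> labels)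
-- scored in one pass over the deduplicated words, selecting with max; an alternative of similar cost.

-- ===== PORT A =====
-- TOPIC_LABELS as an ordered list of (keyword frozenset as a nodup list, label); the in-literal
-- duplicate "staff" is dropped, as the Python frozenset literal does.
def topicTable : List (List String × String) :=
  [ (["transfer","signing","contract","deal","loan","fee","market","window","rumors","move"], "Transfers & Signings")
  , (["goal","score","win","loss","draw","points","result","final","penalty","extra","time"], "Match Results")
  , (["injury","injured","return","surgery","fitness","health","week","knee","hamstring","medical"], "Injuries & Fitness")
  , (["coach","manager","head","fired","appointed","staff","tactical","formation","lineup"], "Coaching & Tactics")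
  , (["playoff","cup","final","championship","mls","conference","supporter","shield","knockout"], "Playoffs & Championships")
  , (["fan","support","fans","ticket","stadium","home","away","crowd","atmosphere","sold","out"], "Fan Culture & Attendance")
  , (["value","salary","wage","budget","spend","ownership","invest","franchise","revenue","worth"], "Finance & Ownership") ]

-- len(keyword_set & word_set) is order-independent, so the intersection length is exact.
def assign_label (top_words : List String) : String :=
  let word_set : PySem.Set String := PySem.Set.ofList top_words
  (topicTable.foldl
    (fun (best : String × Int) (e : List String × String) =>
      let score : Int := ((PySem.Set.inter e.1 word_set).length : Int)
      if score > best.2 then (e.2, score) else best)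
    ("General MLS News", (0 : Int))).1

-- ===== PORT B =====
-- KEYWORD_LABELS: the literal inverted dict from Source B
def invIndex : PySem.Dict String (List String) := PySem.Dict.ofList
  [ ("contract", ["Transfers & Signings"])
  , ("deal", ["Transfers & Signings"])
  , ("fee", ["Transfers & Signings"])
  , ("loan", ["Transfers & Signings"])
  , ("market", ["Transfers & Signings"])
  , ("move", ["Transfers & Signings"])
  , ("rumors", ["Transfers & Signings"])
  , ("signing", ["Transfers & Signings"])
  , ("transfer", ["Transfers & Signings"])
  , ("window", ["Transfers & Signings"])
  , ("draw", ["Match Results"])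
  , ("extra", ["Match Results"])
  , ("final", ["Match Results", "Playoffs & Championships"])
  , ("goal", ["Match Results"])
  , ("loss", ["Match Results"])
  , ("penalty", ["Match Results"])
  , ("points", ["Match Results"])
  , ("result", ["Match Results"])
  , ("score", ["Match Results"])
  , ("time", ["Match Results"])
  , ("win", ["Match Results"])
  , ("fitness", ["Injuries & Fitness"])
  , ("hamstring", ["Injuries & Fitness"])
  , ("health", ["Injuries & Fitness"])
  , ("injured", ["Injuries & Fitness"])
  , ("injury", ["Injuries & Fitness"])
  , ("knee", ["Injuries & Fitness"])
  , ("medical", ["Injuries & Fitness"])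
  , ("return", ["Injuries & Fitness"])
  , ("surgery", ["Injuries & Fitness"])
  , ("week", ["Injuries & Fitness"])
  , ("appointed", ["Coaching & Tactics"])
  , ("coach", ["Coaching & Tactics"])
  , ("fired", ["Coaching & Tactics"])
  , ("formation", ["Coaching & Tactics"])
  , ("head", ["Coaching & Tactics"])
  , ("lineup", ["Coaching & Tactics"])
  , ("manager", ["Coaching & Tactics"])
  , ("staff", ["Coaching & Tactics"])
  , ("tactical", ["Coaching & Tactics"])
  , ("championship", ["Playoffs & Championships"])
  , ("conference", ["Playoffs & Championships"])
  , ("cup", ["Playoffs & Championships"])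
  , ("knockout", ["Playoffs & Championships"])
  , ("mls", ["Playoffs & Championships"])
  , ("playoff", ["Playoffs & Championships"])
  , ("shield", ["Playoffs & Championships"])
  , ("supporter", ["Playoffs & Championships"])
  , ("atmosphere", ["Fan Culture & Attendance"])
  , ("away", ["Fan Culture & Attendance"])
  , ("crowd", ["Fan Culture & Attendance"])
  , ("fan", ["Fan Culture & Attendance"])
  , ("fans", ["Fan Culture & Attendance"])
  , ("home", ["Fan Culture & Attendance"])
  , ("out", ["Fan Culture & Attendance"])
  , ("sold", ["Fan Culture & Attendance"])
  , ("stadium", ["Fan Culture & Attendance"])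
  , ("support", ["Fan Culture & Attendance"])
  , ("ticket", ["Fan Culture & Attendance"])
  , ("budget", ["Finance & Ownership"])
  , ("franchise", ["Finance & Ownership"])
  , ("invest", ["Finance & Ownership"])
  , ("ownership", ["Finance & Ownership"])
  , ("revenue", ["Finance & Ownership"])
  , ("salary", ["Finance & Ownership"])
  , ("spend", ["Finance & Ownership"])
  , ("value", ["Finance & Ownership"])
  , ("wage", ["Finance & Ownership"])
  , ("worth", ["Finance & Ownership"]) ]

-- LABELS
def labelsB : List String :=
  ["Transfers & Signings", "Match Results", "Injuries & Fitness", "Coaching & Tactics",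
   "Playoffs & Championships", "Fan Culture & Attendance", "Finance & Ownership"]

-- the scores dict; iterates set(top_words) — only looked up afterwards, so order-independent
def bScores (top_words : List String) : PySem.Dict String Int :=
  (PySem.Set.ofList top_words).foldl
    (fun d w => (invIndex.getD w []).foldl (fun d l => d.insert l (d.getD l 0 + 1)) d)
    PySem.Dict.empty

-- best = max(LABELS, key=lambda l: scores.get(l, 0)); LABELS is nonempty so max returns
def assign_label_alt (top_words : List String) : String :=
  let scores := bScores top_words
  match PySem.List.max? labelsB (fun l => scores.getD l 0) with
  | some best => if scores.getD best 0 > 0 then best else "General MLS News"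
  | none => "General MLS News"

-- ===== PRECONDITION & SPEC =====
def Spec_assign_label (top_words : List String) (out : String) : Prop := out = assign_label_alt top_words
instance (top_words : List String) (out : String) : Decidable (Spec_assign_label top_words out) := by unfold Spec_assign_label; infer_instance

-- ===== CLAIM (what is proved, stated in full; the proofs are below) =====
def Claim_equal_assign_label : Prop := ∀ (top_words : List String), Dom_assign_label top_words → Spec_assign_label top_words (assign_label top_words)

-- ===== LEMMAS AND PROOFS =====

-- all keywords, with repetitions (it is only ever used through membership)
def kwAll : List String := topicTable.flatMap (·.1)

theorem keys_sub : ∀ w ∈ invIndex.keys, w ∈ kwAll := by decide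

-- how often label L is credited when word w is seen
theorem bridge (K : List String) (L : String)
    (h1 : ∀ w ∈ kwAll, ((invIndex.getD w []).count L : Int) = if w ∈ K then 1 else 0)
    (h2 : ∀ w ∈ K, w ∈ kwAll) (w : String) :
    ((invIndex.getD w []).count L : Int) = if w ∈ K then 1 else 0 := by
  by_cases hw : w ∈ kwAll
  · exact h1 w hw
  · have hnone : invIndex.get? w = none := by
      rw [PySem.Dict.get?_eq_none_iff_not_mem_keys]
      exact fun h => hw (keys_sub w h)
    rw [PySem.Dict.getD_eq_get?_getD, hnone, if_neg (fun h => hw (h2 w h))]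
    simp

theorem scores_getD (ws : List String) (d : PySem.Dict String Int) (L : String) :
    (ws.foldl (fun d w => (invIndex.getD w []).foldl (fun d l => d.insert l (d.getD l 0 + 1)) d) d).getD L 0
      = d.getD L 0 + (ws.map (fun w => ((invIndex.getD w []).count L : Int))).sum := by
  induction ws generalizing d with
  | nil => simp
  | cons w ws ih =>
    simp only [List.foldl_cons, List.map_cons, List.sum_cons, ih,
      PySem.Dict.getD_foldl_insert_add_one]
    ring

theorem sum_if_mem (K : List String) (ws : List String) :
    (ws.map (fun w => if w ∈ K then (1 : Int) else 0)).sum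
      = ((ws.filter (fun w => decide (w ∈ K))).length : Int) := by
  induction ws with
  | nil => simp
  | cons w ws ih =>
    by_cases h : w ∈ K <;> simp [h, ih]
    ring

theorem filter_mem_length_comm {α : Type} [DecidableEq α] (a b : List α)
    (ha : a.Nodup) (hb : b.Nodup) :
    (a.filter (fun x => decide (x ∈ b))).length = (b.filter (fun x => decide (x ∈ a))).length := by
  have key : ∀ (x y : List α), x.Nodup →
      (x.filter (fun e => decide (e ∈ y))).length = (x.toFinset ∩ y.toFinset).card := by
    intro x y hx
    rw [← List.toFinset_card_of_nodup (hx.filter _)]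
    congr 1
    ext e
    simp
  rw [key a b ha, key b a hb, Finset.inter_comm]

theorem inter_length (K : List String) (ws : List String) (hK : K.Nodup) :
    (PySem.Set.inter K ws).length = (K.filter (fun x => decide (x ∈ ws))).length := by
  have hperm : (PySem.Set.inter K ws).Perm (K.filter (fun x => decide (x ∈ ws))) := by
    rw [List.perm_ext_iff_of_nodup (PySem.Set.nodup_inter _ _ hK) (hK.filter _)]
    intro x
    simp [PySem.Set.mem_inter, List.mem_filter]
  exact hperm.length_eq

theorem scoreEq_gen (top_words : List String) (K : List String) (L : String) (hK : K.Nodup)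
    (h1 : ∀ w ∈ kwAll, ((invIndex.getD w []).count L : Int) = if w ∈ K then 1 else 0)
    (h2 : ∀ w ∈ K, w ∈ kwAll) :
    (bScores top_words).getD L 0
      = ((PySem.Set.inter K (PySem.Set.ofList top_words)).length : Int) := by
  have hws : (PySem.Set.ofList top_words).Nodup := PySem.Set.nodup_ofList top_words
  rw [bScores, scores_getD]
  have hcong : (PySem.Set.ofList top_words).map (fun w => ((invIndex.getD w []).count L : Int))
      = (PySem.Set.ofList top_words).map (fun w => if w ∈ K then (1 : Int) else 0) :=
    List.map_congr_left (fun w _ => bridge K L h1 h2 w)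
  rw [hcong, sum_if_mem,
    ← filter_mem_length_comm K (PySem.Set.ofList top_words) hK hws,
    ← inter_length K (PySem.Set.ofList top_words) hK]
  simp

theorem score1 (tw : List String) : (bScores tw).getD "Transfers & Signings" 0
    = ((PySem.Set.inter ["transfer","signing","contract","deal","loan","fee","market","window","rumors","move"] (PySem.Set.ofList tw)).length : Int) :=
  scoreEq_gen tw _ _ (by decide) (by decide) (by decide)

theorem score2 (tw : List String) : (bScores tw).getD "Match Results" 0
    = ((PySem.Set.inter ["goal","score","win","loss","draw","points","result","final","penalty","extra","time"] (PySem.Set.ofList tw)).length : Int) :=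
  scoreEq_gen tw _ _ (by decide) (by decide) (by decide)

theorem score3 (tw : List String) : (bScores tw).getD "Injuries & Fitness" 0
    = ((PySem.Set.inter ["injury","injured","return","surgery","fitness","health","week","knee","hamstring","medical"] (PySem.Set.ofList tw)).length : Int) :=
  scoreEq_gen tw _ _ (by decide) (by decide) (by decide)

theorem score4 (tw : List String) : (bScores tw).getD "Coaching & Tactics" 0
    = ((PySem.Set.inter ["coach","manager","head","fired","appointed","staff","tactical","formation","lineup"] (PySem.Set.ofList tw)).length : Int) :=
  scoreEq_gen tw _ _ (by decide) (by decide) (by decide)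

theorem score5 (tw : List String) : (bScores tw).getD "Playoffs & Championships" 0
    = ((PySem.Set.inter ["playoff","cup","final","championship","mls","conference","supporter","shield","knockout"] (PySem.Set.ofList tw)).length : Int) :=
  scoreEq_gen tw _ _ (by decide) (by decide) (by decide)

theorem score6 (tw : List String) : (bScores tw).getD "Fan Culture & Attendance" 0
    = ((PySem.Set.inter ["fan","support","fans","ticket","stadium","home","away","crowd","atmosphere","sold","out"] (PySem.Set.ofList tw)).length : Int) :=
  scoreEq_gen tw _ _ (by decide) (by decide) (by decide)

theorem score7 (tw : List String) : (bScores tw).getD "Finance & Ownership" 0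
    = ((PySem.Set.inter ["value","salary","wage","budget","spend","ownership","invest","franchise","revenue","worth"] (PySem.Set.ofList tw)).length : Int) :=
  scoreEq_gen tw _ _ (by decide) (by decide) (by decide)

-- ===== selection equivalence: running strict-max fold vs max-then-zero-check =====

def mstep (f : String → Int) (acc : Option String) (l : String) : Option String :=
  match acc with
  | none => some l
  | some m' => if f m' < f l then some l else some m'

def finishSel (f : String → Int) : Option String → String
  | some m => if f m > 0 then m else "General MLS News"
  | none => "General MLS News"

theorem sel_aux1 (f : String → Int) : ∀ (labels : List String) (m : String), 0 < f m →
    (labels.foldl (fun (best : String × Int) l => if f l > best.2 then (l, f l) else best) (m, f m)).1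
      = finishSel f (labels.foldl (mstep f) (some m)) := by
  intro labels
  induction labels with
  | nil => intro m hm; simp [finishSel, hm]
  | cons l t ih =>
    intro m hm
    simp only [List.foldl_cons]
    by_cases h : f m < f l
    · rw [if_pos (by simpa using h), show mstep f (some m) l = some l from if_pos h]
      exact ih l (hm.trans h)
    · rw [if_neg (by simpa using h), show mstep f (some m) l = some m from if_neg h]
      exact ih m hm

theorem sel_aux0 (f : String → Int) : ∀ (labels : List String) (acc : Option String),
    (∀ m, acc = some m → f m ≤ 0) →
    (labels.foldl (fun (best : String × Int) l => if f l > best.2 then (l, f l) else best) ("General MLS News", (0 : Int))).1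
      = finishSel f (labels.foldl (mstep f) acc) := by
  intro labels
  induction labels with
  | nil =>
    intro acc hacc
    match acc with
    | none => simp [finishSel]
    | some m =>
      have := hacc m rfl
      simp [finishSel]
      omega
  | cons l t ih =>
    intro acc hacc
    simp only [List.foldl_cons]
    cases acc with
    | none =>
      by_cases hl : 0 < f l
      · rw [if_pos (by simpa using hl)]
        exact sel_aux1 f t l hl
      · rw [if_neg (by simpa using hl)]
        apply ih
        intro m' hm'
        simp only [mstep] at hm'
        cases hm'
        omega
    | some m =>
      have hm := hacc m rfl
      by_cases hl : 0 < f l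
      · rw [if_pos (by simpa using hl)]
        have hred : mstep f (some m) l = some l := by
          rw [mstep]
          exact if_pos (by omega)
        rw [hred]
        exact sel_aux1 f t l hl
      · rw [if_neg (by simpa using hl)]
        apply ih
        intro m' hm'
        simp only [mstep] at hm'
        by_cases h2 : f m < f l
        · rw [if_pos h2] at hm'
          cases hm'
          omega
        · rw [if_neg h2] at hm'
          cases hm'
          omega

theorem sel (f : String → Int) (labels : List String) :
    (labels.foldl (fun (best : String × Int) l => if f l > best.2 then (l, f l) else best) ("General MLS News", (0 : Int))).1
      = finishSel f (PySem.List.max? labels f) := by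
  rw [PySem.List.max?,
    PySem.List.foldl_congr_mem labels _ (mstep f) none (by intro acc x _; cases acc <;> rfl)]
  exact sel_aux0 f labels none (by simp)

-- ===== VERDICT (by name: the statement is the Claim_ definition above) =====
theorem assign_label_spec : Claim_equal_assign_label := by
  intro tw _
  show assign_label tw = assign_label_alt tw
  have hA : assign_label tw
      = (labelsB.foldl (fun (best : String × Int) l => if (bScores tw).getD l 0 > best.2 then (l, (bScores tw).getD l 0) else best) ("General MLS News", (0 : Int))).1 := by
    rw [assign_label]
    have hcong := PySem.List.foldl_congr_mem topicTable
      (fun (best : String × Int) (e : List String × String) =>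
        if ((PySem.Set.inter e.1 (PySem.Set.ofList tw)).length : Int) > best.2
        then (e.2, ((PySem.Set.inter e.1 (PySem.Set.ofList tw)).length : Int)) else best)
      (fun (best : String × Int) (e : List String × String) =>
        if (bScores tw).getD e.2 0 > best.2 then (e.2, (bScores tw).getD e.2 0) else best)
      ("General MLS News", (0 : Int))
      (by
        intro acc e he
        fin_cases he <;>
          simp only [score1 tw, score2 tw, score3 tw, score4 tw, score5 tw, score6 tw, score7 tw])
    simp only [hcong]
    have : labelsB = topicTable.map (·.2) := by decide
    rw [this, List.foldl_map]
  rw [hA, sel (fun l => (bScores tw).getD l 0) labelsB]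
  rw [assign_label_alt]
  cases hmx : PySem.List.max? labelsB (fun l => (bScores tw).getD l 0) <;>
    simp [finishSel]
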